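-- pv_equiv track=rewrite | github.com/pypi-data/pypi-mirror-343 | packages/tech-analysis/tech_analysis-0.1.0.tar.gz/tech_analysis-0.1.0/tech_analysis/patterns.py | break_of_structure
-- ===== SOURCE A (Python) =====
-- def break_of_structure(high, low):
--     bos = []
--     for i in range(1, len(high)):
--         if high[i] > max(high[:i]):
--             bos.append("bullish")
--         elif low[i] < min(low[:i]):
--             bos.append("bearish")
--         else:
--             bos.append(None)
--     return bos
-- ===== SOURCE B (Python) =====
-- def break_of_structure(high, low):
--     # Single pass with running prefix max(high) / min(low): O(n) instead of A's O(n^2).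
--     if len(high) < 2:
--         return []
--     bos = []
--     mx, mn = high[0], low[0]
--     for h, l in zip(high[1:], low[1:]):
--         if h > mx:
--             bos.append("bullish")
--         elif l < mn:
--             bos.append("bearish")
--         else:
--             bos.append(None)
--         mx = max(mx, h)
--         mn = min(mn, l)
--     return bos
-- ===== Notes on version B (the rewrite author's own statement) =====
-- stated objective: faster
-- what changed: Replaced the per-bar recomputation of max(high[:i])/min(low[:i]) by a single pass that carries a running prefix max and prefix min while zipping the two tails.
-- outside the precondition, e.g. on break_of_structure([1, 2], [5]): A returns ['bullish'], B returns []
import Mathlib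
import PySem

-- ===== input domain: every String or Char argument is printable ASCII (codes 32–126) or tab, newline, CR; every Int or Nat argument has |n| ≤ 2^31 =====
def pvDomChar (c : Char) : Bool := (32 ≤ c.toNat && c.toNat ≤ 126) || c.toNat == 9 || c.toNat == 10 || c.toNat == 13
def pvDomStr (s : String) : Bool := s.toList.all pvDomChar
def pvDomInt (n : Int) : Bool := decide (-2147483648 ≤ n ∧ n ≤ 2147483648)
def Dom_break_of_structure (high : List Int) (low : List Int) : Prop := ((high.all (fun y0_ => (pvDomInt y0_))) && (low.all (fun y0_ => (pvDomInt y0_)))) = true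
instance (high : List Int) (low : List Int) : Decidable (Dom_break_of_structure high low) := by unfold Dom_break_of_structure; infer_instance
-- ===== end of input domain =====

-- B replaces A's per-bar max(high[:i])/min(low[:i]) rescans by one pass with a running
-- prefix max/min (asymptotically faster). Equivalence of RETURN values is proved on Pre_.

-- ===== PORT A =====
-- literal transliteration of Source A: for i in range(1, len(high)) appending per branch;
-- max(..)/min(..)/low[i] that would raise in Python surface as `none` and leave bos unchanged
-- (those inputs are excluded by Pre_).
def break_of_structure (high : List Int) (low : List Int) : List (Option String) :=
  (PySem.List.pyRange 1 (high.length : Int) 1).foldl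
    (fun bos i =>
      match PySem.List.max? (PySem.List.slice high none (some i)) (fun y => y) with
      | none => bos
      | some mx =>
        if PySem.List.pyGetD high i 0 > mx then
          bos ++ [some "bullish"]
        else
          match PySem.List.pyGet? low i,
                PySem.List.min? (PySem.List.slice low none (some i)) (fun y => y) with
          | some li, some mn =>
            if li < mn then bos ++ [some "bearish"] else bos ++ [none]
          | _, _ => bos) []

-- ===== PORT B =====
-- one fold step of Source B's loop over zip(high[1:], low[1:]) carrying (bos, running max, running min)
def bosStepB (st : List (Option String) × Int × Int) (hl : Int × Int) :
    List (Option String) × Int × Int :=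
  let b : Option String :=
    if hl.1 > st.2.1 then some "bullish"
    else if hl.2 < st.2.2 then some "bearish"
    else none
  (st.1 ++ [b], max st.2.1 hl.1, min st.2.2 hl.2)

def break_of_structure_alt (high : List Int) (low : List Int) : List (Option String) :=
  if high.length < 2 then []
  else
    match high, low with
    | h0 :: ht, l0 :: lt =>
      ((List.zip ht lt).foldl bosStepB ([], h0, l0)).1
    | _, _ => []   -- low = [] : Python B raises IndexError here (outside Pre_)

-- ===== PRECONDITION & SPEC =====
-- Pre_ excludes inputs where low is shorter than a multi-bar high: there Python A raises
-- IndexError/ValueError on the bearish branch except in the accidental case where every bar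
-- is a bullish break (see the cite), and Python B reads low[0] / truncates via zip.
def Pre_break_of_structure (high : List Int) (low : List Int) : Prop :=
  high.length ≤ 1 ∨ high.length ≤ low.length
instance (high : List Int) (low : List Int) : Decidable (Pre_break_of_structure high low) := by
  unfold Pre_break_of_structure; infer_instance
def pvWitness_break_of_structure : List Int × List Int := ([3, 4, 2], [1, 2, 0])

def Spec_break_of_structure (high : List Int) (low : List Int) (out : List (Option String)) : Prop := out = break_of_structure_alt high low
instance (high : List Int) (low : List Int) (out : List (Option String)) : Decidable (Spec_break_of_structure high low out) := by unfold Spec_break_of_structure; infer_instance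

-- ===== CLAIM (what is proved, stated in full; the proofs are below) =====
def Claim_equal_break_of_structure : Prop := ∀ (high : List Int) (low : List Int), Dom_break_of_structure high low → Pre_break_of_structure high low → Spec_break_of_structure high low (break_of_structure high low)

-- ===== LEMMAS AND PROOFS =====

-- max/min of a nonempty list written as a fold over its tail
def pvMax : List Int → Int
  | [] => 0
  | x :: t => t.foldl max x
def pvMin : List Int → Int
  | [] => 0
  | x :: t => t.foldl min x

-- the value A appends for bar i (both sides are shown to produce this elementwise)
def pvSpec (high low : List Int) (i : Nat) : Option String :=
  if high.getD i 0 > pvMax (high.take i) then some "bullish"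
  else if low.getD i 0 < pvMin (low.take i) then some "bearish"
  else none

theorem pvMax_append (P : List Int) (h : Int) (hP : P ≠ []) :
    pvMax (P ++ [h]) = max (pvMax P) h := by
  cases P with
  | nil => simp at hP
  | cons x t => simp [pvMax, List.foldl_append]

theorem pvMin_append (P : List Int) (h : Int) (hP : P ≠ []) :
    pvMin (P ++ [h]) = min (pvMin P) h := by
  cases P with
  | nil => simp at hP
  | cons x t => simp [pvMin, List.foldl_append]

theorem pvSpec_at_prefix (P Q hs ls : List Int) (h l : Int) (hP : P ≠ []) (hQ : Q ≠ [])
    (hlen : P.length = Q.length) :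
    pvSpec (P ++ h :: hs) (Q ++ l :: ls) P.length =
      (if h > pvMax P then some "bullish" else if l < pvMin Q then some "bearish" else none) := by
  have hH : (P ++ h :: hs)[P.length]? = some h := by
    rw [List.getElem?_append_right (le_refl _)]; simp
  have hL : (Q ++ l :: ls)[P.length]? = some l := by
    rw [hlen, List.getElem?_append_right (le_refl _)]
    simp [hlen]
  have hT : (P ++ h :: hs).take P.length = P := by
    simp [List.take_append_of_le_length (le_refl P.length)]
  have hT' : (Q ++ l :: ls).take P.length = Q := by
    simp [hlen, List.take_append_of_le_length (le_refl Q.length)]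
  simp [pvSpec, hH, hL, hT, hT']

-- B's loop invariant: folding over zip of the tails, starting from the prefix extrema,
-- appends exactly the pvSpec values at positions P.length, P.length+1, …
theorem bosLoop (hs : List Int) : ∀ (ls P Q : List Int) (acc : List (Option String)),
    P ≠ [] → Q ≠ [] → P.length = Q.length → hs.length ≤ ls.length →
    ((List.zip hs ls).foldl bosStepB (acc, pvMax P, pvMin Q)).1 =
      acc ++ (List.range hs.length).map (fun k => pvSpec (P ++ hs) (Q ++ ls) (P.length + k)) := by
  induction hs with
  | nil => intro ls P Q acc _ _ _ _; simp
  | cons h hs ih =>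
    intro ls P Q acc hP hQ hlen hle
    cases ls with
    | nil => simp at hle
    | cons l ls =>
      have hstep :
          ((List.zip (h :: hs) (l :: ls)).foldl bosStepB (acc, pvMax P, pvMin Q)).1 =
          ((List.zip hs ls).foldl bosStepB
            (acc ++ [pvSpec (P ++ h :: hs) (Q ++ l :: ls) P.length],
             pvMax (P ++ [h]), pvMin (Q ++ [l]))).1 := by
        simp only [List.zip_cons_cons, List.foldl_cons]
        rw [pvSpec_at_prefix P Q hs ls h l hP hQ hlen,
            pvMax_append P h hP, pvMin_append Q l hQ]
        rfl
      rw [hstep, ih ls (P ++ [h]) (Q ++ [l])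
            (acc ++ [pvSpec (P ++ h :: hs) (Q ++ l :: ls) P.length])
            (by simp) (by simp) (by simp [hlen]) (by simpa using Nat.le_of_succ_le_succ hle)]
      have hre : P ++ [h] ++ hs = P ++ h :: hs := by simp
      have hre' : Q ++ [l] ++ ls = Q ++ l :: ls := by simp
      rw [hre, hre', List.length_cons, List.range_succ_eq_map, List.map_cons, List.map_map]
      have hmap : List.map (fun k => pvSpec (P ++ h :: hs) (Q ++ l :: ls) ((P ++ [h]).length + k))
            (List.range hs.length)
          = List.map ((fun k => pvSpec (P ++ h :: hs) (Q ++ l :: ls) (P.length + k)) ∘ (· + 1))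
            (List.range hs.length) := by
        apply List.map_congr_left
        intro k _
        simp only [Function.comp, List.length_append, List.length_cons, List.length_nil]
        congr 1
        omega
      rw [hmap]
      simp [List.append_assoc]

-- A's loop: the fold over range(1, n) appends pvSpec i at every index, by induction on the
-- number of processed indices (range m, indices 1 … m), valid while m+1 ≤ n ≤ len low.
theorem aLoop (high low : List Int) (hlow : high.length ≤ low.length) :
    ∀ (m : Nat), m + 1 ≤ high.length →
    (PySem.List.pyRange 1 ((m : Int) + 1) 1).foldl
      (fun bos i =>
        match PySem.List.max? (PySem.List.slice high none (some i)) (fun y => y) with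
        | none => bos
        | some mx =>
          if PySem.List.pyGetD high i 0 > mx then bos ++ [some "bullish"]
          else
            match PySem.List.pyGet? low i,
                  PySem.List.min? (PySem.List.slice low none (some i)) (fun y => y) with
            | some li, some mn =>
              if li < mn then bos ++ [some "bearish"] else bos ++ [none]
            | _, _ => bos) []
      = (List.range m).map (fun k => pvSpec high low (k + 1)) := by
  intro m
  induction m with
  | zero =>
    intro _
    rw [PySem.List.pyRange_one_eq_nil (by norm_num)]
    simp
  | succ m ih =>
    intro hm
    have hsplit : PySem.List.pyRange 1 (((m + 1 : Nat) : Int) + 1) 1 =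
        PySem.List.pyRange 1 ((m : Int) + 1) 1 ++ [(m : Int) + 1] := by
      have h2 : ((m + 1 : Nat) : Int) + 1 = ((m : Int) + 1) + 1 := by push_cast; ring
      rw [h2, PySem.List.pyRange_one_succ_right (by omega)]
    rw [hsplit, List.foldl_append, ih (by omega), List.range_succ, List.map_append]
    simp only [List.map_cons, List.map_nil, List.foldl_cons, List.foldl_nil]
    -- evaluate the body at index i = m + 1
    have hi : ((m : Int) + 1) = ((m + 1 : Nat) : Int) := by push_cast; ring
    have hne : high.take (m + 1) ≠ [] := by
      have : high ≠ [] := by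
        intro h; rw [h] at hm; simp at hm
      cases high with
      | nil => simp at this
      | cons x t => simp [List.take]
    have hsl : PySem.List.slice high none (some ((m : Int) + 1)) = high.take (m + 1) := by
      rw [hi, PySem.List.slice_to_natCast]
    have hmax : PySem.List.max? (high.take (m + 1)) (fun y => y) = some (pvMax (high.take (m + 1))) := by
      cases htk : high.take (m + 1) with
      | nil => exact absurd htk hne
      | cons x t => rw [PySem.List.max?_id_cons]; rfl
    have hlne : low.take (m + 1) ≠ [] := by
      have : low ≠ [] := by
        have : 0 < low.length := by omega
        intro h; rw [h] at this; simp at this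
      cases low with
      | nil => simp at this
      | cons x t => simp [List.take]
    have hsl' : PySem.List.slice low none (some ((m : Int) + 1)) = low.take (m + 1) := by
      rw [hi, PySem.List.slice_to_natCast]
    have hmin : PySem.List.min? (low.take (m + 1)) (fun y => y) = some (pvMin (low.take (m + 1))) := by
      cases htk : low.take (m + 1) with
      | nil => exact absurd htk hlne
      | cons x t => rw [PySem.List.min?_id_cons]; rfl
    have hgh : PySem.List.pyGetD high ((m : Int) + 1) 0 = high.getD (m + 1) 0 := by
      rw [hi, PySem.List.pyGetD_natCast]
    have hgl : PySem.List.pyGet? low ((m : Int) + 1) = some (low.getD (m + 1) 0) := by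
      rw [hi, PySem.List.pyGet?_natCast]
      have hlt : m + 1 < low.length := by omega
      simp [List.getElem?_eq_getElem hlt, List.getD, List.getElem?_eq_getElem hlt]
    simp only [hsl, hmax, hgh, hsl', hmin, hgl]
    simp only [pvSpec]
    split_ifs <;> rfl

-- ===== VERDICT (by name: the statement is the Claim_ definition above) =====
theorem break_of_structure_spec : Claim_equal_break_of_structure := by
  intro high low _ hpre
  unfold Spec_break_of_structure
  by_cases hsmall : high.length < 2
  · -- both sides are []
    unfold break_of_structure break_of_structure_alt
    rw [if_pos hsmall]
    have : PySem.List.pyRange 1 (high.length : Int) 1 = [] := by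
      apply PySem.List.pyRange_one_eq_nil
      omega
    rw [this]; rfl
  · rw [Nat.not_lt] at hsmall
    have hlow : high.length ≤ low.length := by
      rcases hpre with h | h
      · omega
      · exact h
    -- destructure both lists
    cases high with
    | nil => simp at hsmall
    | cons h0 ht =>
      cases low with
      | nil => simp at hlow
      | cons l0 lt =>
        unfold break_of_structure
        have hBalt : break_of_structure_alt (h0 :: ht) (l0 :: lt) =
            (List.foldl bosStepB ([], h0, l0) (ht.zip lt)).1 := by
          unfold break_of_structure_alt
          rw [if_neg (by omega)]
        rw [hBalt]
        -- B side via the loop invariant with P = [h0], Q = [l0]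
        have hB := bosLoop ht lt [h0] [l0] [] (by simp) (by simp) (by simp)
          (by simpa using Nat.le_of_succ_le_succ hlow)
        have hB' : pvMax [h0] = h0 := by simp [pvMax]
        have hB'' : pvMin [l0] = l0 := by simp [pvMin]
        rw [hB', hB''] at hB
        rw [hB]
        -- A side via aLoop with m = length ht
        have hA := aLoop (h0 :: ht) (l0 :: lt) hlow ht.length (by simp)
        have hrange : ((h0 :: ht).length : Int) = ((ht.length : Int) + 1) := by
          simp
        rw [hrange, hA]
        simp only [List.nil_append, List.singleton_append, List.length_cons,
          List.length_nil]
        apply List.map_congr_left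
        intro k _
        congr 1
        omega
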